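-- pv_equiv track=rewrite | github.com/cabaerica/Python_Caba_Oana-Erica_3A2 | Proiect C14/uniq_functions.py | uniq_unique
-- ===== SOURCE A (Python) =====
-- def uniq_unique(input):
--     count = 1
--     output = []
--     if len(input) <= 1:
--         return []
--
--     for i in range(1, len(input)):
--         if input[i] == input[i - 1]:
--             count += 1
--         else:
--             if count == 1:
--                 output.append(input[i - 1])
--             count = 1
--     if input[-1] != input[-2]:
--         output.append(input[-1])
--     if not output:
--         return []
--     return output
-- ===== SOURCE B (Python) =====
-- def uniq_unique(input):
--     if len(input) <= 1:
--         return []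
--     output = []
--     i = 0
--     n = len(input)
--     while i < n:
--         j = i + 1
--         while j < n and input[j] == input[i]:
--             j += 1
--         if j == i + 1:
--             output.append(input[i])
--         i = j
--     return output
-- ===== Notes on version B (the rewrite author's own statement) =====
-- stated objective: alternative
-- what changed: Replaces A's pairwise counter loop with its input[-1]!=input[-2] end fixup by a two-pointer run scanner: an inner loop finds the end of each consecutive run and the element is emitted iff the run has length 1, with no final-element special case.
import Mathlib
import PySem

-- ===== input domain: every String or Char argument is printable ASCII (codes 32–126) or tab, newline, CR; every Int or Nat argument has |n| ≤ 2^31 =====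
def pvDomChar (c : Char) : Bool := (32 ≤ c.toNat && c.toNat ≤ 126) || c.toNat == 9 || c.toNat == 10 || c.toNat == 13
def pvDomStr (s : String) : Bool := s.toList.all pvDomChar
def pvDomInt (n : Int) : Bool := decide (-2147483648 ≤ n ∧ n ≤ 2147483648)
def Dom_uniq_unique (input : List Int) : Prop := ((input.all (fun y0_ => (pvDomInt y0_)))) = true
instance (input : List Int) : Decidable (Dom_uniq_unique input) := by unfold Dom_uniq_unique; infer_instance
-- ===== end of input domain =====

-- B replaces A's pairwise counter-with-end-fixup by a two-pointer scan over consecutive runs (alternative decomposition, same cost).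

-- ===== PORT A =====
def uniq_unique (input : List Int) : List Int :=
  if input.length ≤ 1 then []
  else
    let st := (PySem.List.pyRange 1 (input.length : Int) 1).foldl
      (fun (st : Int × List Int) i =>
        if PySem.List.pyGetD input i 0 = PySem.List.pyGetD input (i - 1) 0 then
          (st.1 + 1, st.2)
        else if st.1 = 1 then (1, st.2 ++ [PySem.List.pyGetD input (i - 1) 0])
        else (1, st.2)) (1, ([] : List Int))
    let output :=
      if PySem.List.pyGetD input (-1) 0 ≠ PySem.List.pyGetD input (-2) 0 then
        st.2 ++ [PySem.List.pyGetD input (-1) 0]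
      else st.2
    if output = [] then [] else output

-- ===== PORT B =====
-- inner while loop of B: first index j > i at which the run of input[i] ends
def runEnd (input : List Int) (i : Nat) : Nat :=
  i + 1 + ((input.drop (i + 1)).takeWhile (fun y => y = PySem.List.pyGetD input (i : Int) 0)).length

-- outer while loop of B
def scanRuns (input : List Int) (i : Nat) : List Int :=
  if _h : i < input.length then
    (if runEnd input i = i + 1 then [PySem.List.pyGetD input (i : Int) 0] else []) ++
      scanRuns input (runEnd input i)
  else []
termination_by input.length - i
decreasing_by
  have : i + 1 ≤ runEnd input i := by unfold runEnd; omega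
  omega

def uniq_unique_alt (input : List Int) : List Int :=
  if input.length ≤ 1 then [] else scanRuns input 0

-- ===== PRECONDITION & SPEC =====
def Spec_uniq_unique (input : List Int) (out : List Int) : Prop := out = uniq_unique_alt input
instance (input : List Int) (out : List Int) : Decidable (Spec_uniq_unique input out) := by unfold Spec_uniq_unique; infer_instance

-- ===== CLAIM (what is proved, stated in full; the proofs are below) =====
def Claim_equal_uniq_unique : Prop := ∀ (input : List Int), Dom_uniq_unique input → Spec_uniq_unique input (uniq_unique input)

-- ===== LEMMAS AND PROOFS =====

-- proof-side recursive form of A's counter loop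
def Aloop : Int → List Int → Int → List Int → Int × List Int
  | _prev, [], c, o => (c, o)
  | prev, y :: ys, c, o =>
    if y = prev then Aloop y ys (c + 1) o
    else Aloop y ys 1 (if c = 1 then o ++ [prev] else o)

-- proof-side form of A's final input[-1] != input[-2] fixup
def endfix (o : List Int) (xs : List Int) : List Int :=
  if PySem.List.pyGetD xs (-1) 0 ≠ PySem.List.pyGetD xs (-2) 0 then
    o ++ [PySem.List.pyGetD xs (-1) 0]
  else o

-- proof-side run recursion (the list-structural reading of B's index scan)
def uniq_scan : List Int → List Int
  | [] => []
  | x :: xs =>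
    (if xs.takeWhile (· = x) = [] then [x] else []) ++ uniq_scan (xs.dropWhile (· = x))
termination_by xs => xs.length
decreasing_by
  have := List.length_dropWhile_le (p := (· = x)) (l := xs)
  simpa using Nat.lt_succ_of_le this

theorem endfix_pair (a b : Int) (o : List Int) :
    endfix o [a, b] = if b ≠ a then o ++ [b] else o := by
  simp [endfix, PySem.List.pyGetD, PySem.List.pyGet?, PySem.List.pyIdx?]

theorem endfix_cons (a : Int) (xs o : List Int) (h : 2 ≤ xs.length) :
    endfix o (a :: xs) = endfix o xs := by
  have hne : xs ≠ [] := by intro h'; simp [h'] at h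
  have h1 : PySem.List.pyGetD (a :: xs) (-1) 0 = PySem.List.pyGetD xs (-1) 0 := by
    rw [PySem.List.pyGetD_neg_one (a :: xs) 0 (by simp), PySem.List.pyGetD_neg_one xs 0 hne,
      List.getLast_cons hne]
  have h2 : PySem.List.pyGetD (a :: xs) (-2) 0 = PySem.List.pyGetD xs (-2) 0 := by
    rw [PySem.List.pyGetD_neg_ofNat (a :: xs) 2 0 (by omega) (by simp; omega),
        PySem.List.pyGetD_neg_ofNat xs 2 0 (by omega) (by omega)]
    have h3 : (a :: xs).length - 2 = (xs.length - 2) + 1 := by simp; omega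
    simp only [h3, List.getElem_cons_succ]
  simp [endfix, h1, h2]

theorem getD_at_append (pre : List Int) (x : Int) (rest : List Int) :
    (pre ++ x :: rest).getD pre.length 0 = x := by
  induction pre with
  | nil => rfl
  | cons a as ih => simpa using ih

theorem fold_eq_aloop (full : List Int) :
    ∀ (rest pre : List Int) (prev : Int) (st : Int × List Int),
    full = pre ++ prev :: rest →
    (PySem.List.pyRange ((pre.length : Int) + 1) (full.length : Int) 1).foldl
      (fun (st : Int × List Int) i =>
        if PySem.List.pyGetD full i 0 = PySem.List.pyGetD full (i - 1) 0 then
          (st.1 + 1, st.2)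
        else if st.1 = 1 then (1, st.2 ++ [PySem.List.pyGetD full (i - 1) 0])
        else (1, st.2)) st
    = Aloop prev rest st.1 st.2 := by
  intro rest
  induction rest with
  | nil =>
    intro pre prev st hfull
    rw [PySem.List.pyRange_one_eq_nil (by simp [hfull])]
    simp [Aloop]
  | cons y ys ih =>
    intro pre prev st hfull
    have hlt : ((pre.length : Int) + 1) < (full.length : Int) := by
      rw [hfull]; push_cast [List.length_append, List.length_cons]; omega
    rw [PySem.List.pyRange_one_cons hlt]
    simp only [List.foldl_cons]
    have e0 : PySem.List.pyGetD full ((pre.length : Int) + 1 - 1) 0 = prev := by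
      rw [show ((pre.length : Int) + 1 - 1) = ((pre.length : Nat) : Int) from by ring,
        PySem.List.pyGetD_natCast, hfull, getD_at_append]
    have e1 : PySem.List.pyGetD full ((pre.length : Int) + 1) 0 = y := by
      rw [show ((pre.length : Int) + 1) = (((pre.length + 1 : Nat)) : Int) from by push_cast; ring,
        PySem.List.pyGetD_natCast, hfull]
      have h' := getD_at_append (pre ++ [prev]) y ys
      simpa using h'
    rw [e0, e1]
    have hfull' : full = (pre ++ [prev]) ++ y :: ys := by simp [hfull]
    have hstart : (((pre ++ [prev]).length : Nat) : Int) + 1 = (pre.length : Int) + 1 + 1 := by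
      simp
    by_cases hyp : y = prev
    · rw [if_pos hyp]
      have := ih (pre ++ [prev]) y (st.1 + 1, st.2) hfull'
      rw [hstart] at this
      rw [this]
      simp [Aloop, hyp]
    · rw [if_neg hyp]
      by_cases hc : st.1 = 1
      · rw [if_pos hc]
        have := ih (pre ++ [prev]) y (1, st.2 ++ [prev]) hfull'
        rw [hstart] at this
        rw [this]
        simp [Aloop, hyp, hc]
      · rw [if_neg hc]
        have := ih (pre ++ [prev]) y (1, st.2) hfull'
        rw [hstart] at this
        rw [this]
        simp [Aloop, hyp, hc]

theorem aloop_scan : ∀ (n : Nat) (rest : List Int), rest.length ≤ n → ∀ (prev : Int) (o : List Int),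
    (rest ≠ [] → endfix (Aloop prev rest 1 o).2 (prev :: rest) = o ++ uniq_scan (prev :: rest)) ∧
    (∀ c : Int, 2 ≤ c →
      endfix (Aloop prev rest c o).2 (prev :: prev :: rest)
        = o ++ uniq_scan (rest.dropWhile (· = prev))) := by
  intro n
  induction n with
  | zero =>
    intro rest hlen prev o
    have : rest = [] := by
      cases rest with
      | nil => rfl
      | cons a as => simp at hlen
    subst this
    refine ⟨by intro h; exact absurd rfl h, ?_⟩
    intro c _
    simp [Aloop, endfix_pair, uniq_scan]
  | succ n ih =>
    intro rest hlen prev o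
    cases rest with
    | nil =>
      refine ⟨by intro h; exact absurd rfl h, ?_⟩
      intro c _
      simp [Aloop, endfix_pair, uniq_scan]
    | cons y ys =>
      have hys : ys.length ≤ n := by simp at hlen; omega
      constructor
      · intro _
        by_cases hyp : y = prev
        · subst hyp
          have h2 := (ih ys hys y o).2 2 (by norm_num)
          rw [show Aloop y (y :: ys) 1 o = Aloop y ys 2 o from by simp [Aloop]]
          rw [h2]
          rw [uniq_scan]
          simp [uniq_scan, List.takeWhile_cons, List.dropWhile_cons]
        · rw [show Aloop prev (y :: ys) 1 o = Aloop y ys 1 (o ++ [prev]) from by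
            simp [Aloop, hyp]]
          have hscan : uniq_scan (prev :: y :: ys) = [prev] ++ uniq_scan (y :: ys) := by
            rw [uniq_scan]
            simp [List.takeWhile_cons, List.dropWhile_cons, hyp]
          rw [hscan]
          cases ys with
          | nil =>
            simp [Aloop, endfix_pair, hyp, uniq_scan]
          | cons z zs =>
            have h1 := (ih (z :: zs) hys y (o ++ [prev])).1 (by simp)
            rw [endfix_cons prev (y :: z :: zs) _ (by simp)]
            rw [h1]
            simp
      · intro c hc
        by_cases hyp : y = prev
        · subst hyp
          have h2 := (ih ys hys y o).2 (c + 1) (by omega)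
          rw [show Aloop y (y :: ys) c o = Aloop y ys (c + 1) o from by simp [Aloop]]
          rw [endfix_cons y (y :: y :: ys) _ (by simp)]
          rw [h2]
          simp [List.dropWhile_cons]
        · have hc1 : c ≠ 1 := by omega
          rw [show Aloop prev (y :: ys) c o = Aloop y ys 1 o from by
            simp [Aloop, hyp, hc1]]
          have hdrop : (y :: ys).dropWhile (· = prev) = y :: ys := by
            simp [List.dropWhile_cons, hyp]
          rw [hdrop]
          cases ys with
          | nil =>
            rw [endfix_cons prev (prev :: [y]) _ (by simp)]
            simp [Aloop, endfix_pair, hyp, uniq_scan]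
          | cons z zs =>
            have h1 := (ih (z :: zs) hys y o).1 (by simp)
            rw [endfix_cons prev (prev :: y :: z :: zs) _ (by simp),
              endfix_cons prev (y :: z :: zs) _ (by simp)]
            rw [h1]

theorem drop_length_takeWhile (p : Int → Bool) (l : List Int) :
    l.drop (l.takeWhile p).length = l.dropWhile p := by
  induction l with
  | nil => rfl
  | cons a l ih =>
    by_cases hpa : p a <;> simp [List.takeWhile_cons, List.dropWhile_cons, hpa, ih]

theorem scanRuns_eq : ∀ (n : Nat) (input : List Int) (i : Nat), input.length - i ≤ n →
    scanRuns input i = uniq_scan (input.drop i) := by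
  intro n
  induction n with
  | zero =>
    intro input i hlen
    have h : ¬ i < input.length := by omega
    rw [scanRuns, dif_neg h, List.drop_eq_nil_of_le (by omega), uniq_scan]
  | succ n ih =>
    intro input i hlen
    by_cases h : i < input.length
    · have hg : PySem.List.pyGetD input (i : Int) 0 = input[i] := by
        rw [PySem.List.pyGetD_natCast]
        exact List.getD_eq_getElem _ _ h
      have hdrop : input.drop i = input[i] :: input.drop (i + 1) :=
        List.drop_eq_getElem_cons h
      have hre : runEnd input i
          = i + 1 + ((input.drop (i + 1)).takeWhile (· = input[i])).length := by
        rw [runEnd]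
        simp [hg]
      have htail : input.drop (runEnd input i)
          = (input.drop (i + 1)).dropWhile (· = input[i]) := by
        rw [hre, ← List.drop_drop, drop_length_takeWhile]
      have hj : i + 1 ≤ runEnd input i := by rw [hre]; omega
      have hrec : scanRuns input (runEnd input i) = uniq_scan (input.drop (runEnd input i)) :=
        ih input (runEnd input i) (by omega)
      rw [scanRuns, dif_pos h, hrec, htail, hdrop, uniq_scan]
      congr 1
      · rw [hre, hg]
        by_cases ht : ((input.drop (i + 1)).takeWhile (· = input[i])) = []
        · simp [ht]
        · have hlen0 : ((input.drop (i + 1)).takeWhile (· = input[i])).length ≠ 0 := by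
            simpa [List.length_eq_zero_iff] using ht
          simp [ht, hlen0]
    · rw [scanRuns, dif_neg h, List.drop_eq_nil_of_le (by omega), uniq_scan]

-- ===== VERDICT (by name: the statement is the Claim_ definition above) =====
theorem uniq_unique_spec : Claim_equal_uniq_unique := by
  intro input _
  unfold Spec_uniq_unique uniq_unique uniq_unique_alt
  by_cases hlen : input.length ≤ 1
  · rw [if_pos hlen, if_pos hlen]
  · rw [if_neg hlen, if_neg hlen]
    obtain ⟨x, y, zs, rfl⟩ : ∃ x y zs, input = x :: y :: zs := by
      cases input with
      | nil => simp at hlen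
      | cons x t =>
        cases t with
        | nil => simp at hlen
        | cons y zs => exact ⟨x, y, zs, rfl⟩
    have hfold := fold_eq_aloop (x :: y :: zs) (y :: zs) [] x (1, []) rfl
    rw [show ((List.length ([] : List Int) : Int) + 1) = 1 from by simp] at hfold
    have hfix := (aloop_scan (y :: zs).length (y :: zs) le_rfl x []).1 (by simp)
    have hB : scanRuns (x :: y :: zs) 0 = uniq_scan (x :: y :: zs) := by
      have := scanRuns_eq (x :: y :: zs).length (x :: y :: zs) 0 (by omega)
      simpa using this
    rw [hB]
    simp only [hfold]
    have hout : (if PySem.List.pyGetD (x :: y :: zs) (-1) 0 ≠ PySem.List.pyGetD (x :: y :: zs) (-2) 0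
        then (Aloop x (y :: zs) (1, ([] : List Int)).1 (1, ([] : List Int)).2).2
          ++ [PySem.List.pyGetD (x :: y :: zs) (-1) 0]
        else (Aloop x (y :: zs) (1, ([] : List Int)).1 (1, ([] : List Int)).2).2)
        = endfix (Aloop x (y :: zs) 1 []).2 (x :: y :: zs) := rfl
    rw [hout, hfix]
    simp only [List.nil_append]
    by_cases hempty : uniq_scan (x :: y :: zs) = []
    · rw [if_pos hempty, hempty]
    · rw [if_neg hempty]
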